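-- pv_equiv track=rewrite | github.com/yukioishi-eng/python-practice | basics/practice_typehint_docstring.py | find_top_students
-- ===== SOURCE A (Python) =====
-- def find_top_students(scores: dict[str, int], min_score: int)-> list[str]:   #引数は変数: 型 、返り値は型を書く
--
--     #docstringはコードの表紙、概要と引数、返り値の説明を書く
--     """
--     Return the names of students with the highest score
--     among those who meet the minimum score requirement.
--
--     Args:
--         scores (dict[str, int]): Dictionary mapping student names to scores
--         min_score (int): Minimum score required to be considered
--
--     Returns:
--         list[str]: List of student names with the highest score
--     """
--     passed_students = {}
--     for name, score in scores.items():
--         if score >= min_score: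
--             passed_students[name] = score
--     if not passed_students:
--         return []
--     max_score = max(passed_students.values())
--
--     return [name for name, score in passed_students.items() if score == max_score]
-- ===== SOURCE B (Python) =====
-- def find_top_students(scores: dict[str, int], min_score: int) -> list[str]:
--     """Single streaming pass: running max with reset, no intermediate dict."""
--     best = None
--     result = []
--     for name, score in scores.items():
--         if score < min_score:
--             continue
--         if best is None or score > best:
--             best = score
--             result = [name]
--         elif score == best:
--             result.append(name)
--     return result
-- ===== Notes on version B (the rewrite author's own statement) =====
-- stated objective: alternative
-- what changed: Replaced A's three-stage pipeline (build a filtered dict, take max of its values, then a second collecting pass) by one streaming pass that keeps a running best score and resets/extends the result list on the fly.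
import Mathlib
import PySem

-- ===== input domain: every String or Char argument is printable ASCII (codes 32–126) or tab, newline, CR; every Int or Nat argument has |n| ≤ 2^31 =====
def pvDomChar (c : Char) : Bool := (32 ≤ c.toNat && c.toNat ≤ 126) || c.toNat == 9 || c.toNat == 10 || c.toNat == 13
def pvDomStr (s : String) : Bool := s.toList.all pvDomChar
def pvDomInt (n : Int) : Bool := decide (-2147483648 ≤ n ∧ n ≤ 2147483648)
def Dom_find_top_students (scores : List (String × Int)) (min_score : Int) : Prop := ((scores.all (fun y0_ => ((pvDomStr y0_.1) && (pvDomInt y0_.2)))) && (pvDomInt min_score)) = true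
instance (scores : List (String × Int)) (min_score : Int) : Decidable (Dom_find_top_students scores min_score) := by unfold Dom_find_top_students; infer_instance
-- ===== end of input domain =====

-- B replaces A's filter-dict → max → collect pipeline by one streaming running-max-with-reset pass (alternative decomposition, same cost).

-- ===== PORT A =====
def find_top_students (scores : List (String × Int)) (min_score : Int) : List String :=
  let passed := scores.foldl (fun d p => if p.2 ≥ min_score then d.insert p.1 p.2 else d)
    (PySem.Dict.empty : PySem.Dict String Int)
  if passed.items.isEmpty then []
  else
    match PySem.List.max? passed.values (fun v => v) with
    | none => []   -- unreachable: passed is nonempty here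
    | some max_score => passed.items.filterMap (fun p => if p.2 = max_score then some p.1 else none)

-- ===== PORT B =====
def altStep (min_score : Int) (st : Option Int × List String) (p : String × Int) : Option Int × List String :=
  if p.2 < min_score then st
  else
    match st.1 with
    | none => (some p.2, [p.1])
    | some b =>
      if p.2 > b then (some p.2, [p.1])
      else if p.2 = b then (some b, st.2 ++ [p.1])
      else st

def find_top_students_alt (scores : List (String × Int)) (min_score : Int) : List String :=
  (scores.foldl (altStep min_score) (none, [])).2

-- ===== PRECONDITION & SPEC =====
-- Pre_ states the dict-representation invariant: Python A's argument is a dict, so its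
-- association-list image has pairwise-distinct keys; it excludes no dict input.
def Pre_find_top_students (scores : List (String × Int)) (min_score : Int) : Prop :=
  (scores.map Prod.fst).Nodup
instance (scores : List (String × Int)) (min_score : Int) : Decidable (Pre_find_top_students scores min_score) := by unfold Pre_find_top_students; infer_instance

def pvWitness_find_top_students : (List (String × Int)) × Int := ([("ann", 3), ("bob", 5), ("cy", 5)], 2)

def Spec_find_top_students (scores : List (String × Int)) (min_score : Int) (out : List String) : Prop := out = find_top_students_alt scores min_score
instance (scores : List (String × Int)) (min_score : Int) (out : List String) : Decidable (Spec_find_top_students scores min_score out) := by unfold Spec_find_top_students; infer_instance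

-- ===== CLAIM (what is proved, stated in full; the proofs are below) =====
def Claim_equal_find_top_students : Prop := ∀ (scores : List (String × Int)) (min_score : Int), Dom_find_top_students scores min_score → Pre_find_top_students scores min_score → Spec_find_top_students scores min_score (find_top_students scores min_score)

-- ===== LEMMAS AND PROOFS =====

-- the filtered list both sides boil down to
def pvQual (m : Int) (scores : List (String × Int)) : List (String × Int) :=
  scores.filter (fun p => m ≤ p.2)

def pvMaxFrom (b : Int) (t : List (String × Int)) : Int :=
  t.foldl (fun c p => max c p.2) b

def pvNames (v : Int) (t : List (String × Int)) : List String :=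
  t.filterMap (fun p => if p.2 = v then some p.1 else none)

-- A's dict of qualifying students has exactly the qualifying pairs, in order (keys fresh).
lemma pvA_dict_items (m : Int) :
    ∀ (scores : List (String × Int)) (d : PySem.Dict String Int),
      (d.keys ++ scores.map Prod.fst).Nodup →
      (scores.foldl (fun d p => if p.2 ≥ m then d.insert p.1 p.2 else d) d).items
        = d.items ++ pvQual m scores := by
  intro scores
  induction scores with
  | nil => intro d _; simp [pvQual]
  | cons p t ih =>
    intro d hnd
    rw [List.map_cons] at hnd
    by_cases hq : p.2 ≥ m
    · have hfresh : d.contains p.1 = false := by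
        have hdisj := (List.nodup_append.mp hnd).2.2
        have hnotin : p.1 ∉ d.keys := fun hmem => hdisj _ hmem p.1 (by simp) rfl
        simpa [PySem.Dict.contains_eq_decide_mem_keys] using hnotin
      have hkeys : (d.insert p.1 p.2).keys = d.keys ++ [p.1] := by
        simp [PySem.Dict.keys, PySem.Dict.items_insert, hfresh]
      have hnd' : ((d.insert p.1 p.2).keys ++ t.map Prod.fst).Nodup := by
        rw [hkeys]; simpa using hnd
      have hrec := ih (d.insert p.1 p.2) hnd'
      rw [List.foldl_cons, if_pos hq, hrec,
        PySem.Dict.items_insert_of_not_contains _ _ hfresh]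
      simp [pvQual, hq]
    · have hnd' : (d.keys ++ t.map Prod.fst).Nodup := by
        refine List.Nodup.sublist ?_ hnd
        exact List.Sublist.append (List.Sublist.refl _) (by simp)
      have hrec := ih d hnd'
      have hnq : ¬ (m ≤ p.2) := by omega
      rw [List.foldl_cons, if_neg hq, hrec]
      simp [pvQual, hnq]

-- B's fold skips non-qualifying pairs, so it equals the fold over the qualifying list.
lemma pvB_fold_filter (m : Int) :
    ∀ (scores : List (String × Int)) (st : Option Int × List String),
      scores.foldl (altStep m) st = (pvQual m scores).foldl (altStep m) st := by
  intro scores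
  induction scores with
  | nil => intro st; simp [pvQual]
  | cons p t ih =>
    intro st
    by_cases hq : m ≤ p.2
    · have hfl : pvQual m (p :: t) = p :: pvQual m t := by
        simp [pvQual, hq]
      rw [hfl, List.foldl_cons, List.foldl_cons]
      exact ih _
    · have hlt : p.2 < m := by omega
      have hfl : pvQual m (p :: t) = pvQual m t := by
        simp [pvQual, hq]
      have hskip : altStep m st p = st := by simp [altStep, hlt]
      rw [hfl, List.foldl_cons, hskip]
      exact ih _

-- invariant of B's streaming loop once a best score exists
lemma pvB_loop (m : Int) :
    ∀ (t : List (String × Int)) (b : Int) (acc : List String),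
      (∀ p ∈ t, m ≤ p.2) →
      t.foldl (altStep m) (some b, acc)
        = (some (pvMaxFrom b t),
           (if pvMaxFrom b t = b then acc else []) ++ pvNames (pvMaxFrom b t) t) := by
  intro t
  induction t with
  | nil => intro b acc _; simp [pvMaxFrom, pvNames]
  | cons p t ih =>
    intro b acc hq
    have hp : ¬ (p.2 < m) := by have := hq p (by simp); omega
    have hq' : ∀ q ∈ t, m ≤ q.2 := fun q hqm => hq q (by simp [hqm])
    have hM : pvMaxFrom b (p :: t) = pvMaxFrom (max b p.2) t := by simp [pvMaxFrom]
    have hle : ∀ (c : Int) (l : List (String × Int)), c ≤ pvMaxFrom c l := by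
      intro c l
      induction l generalizing c with
      | nil => simp [pvMaxFrom]
      | cons x xs ihx =>
        have := ihx (max c x.2)
        simp only [pvMaxFrom, List.foldl_cons] at *
        exact le_trans (le_max_left _ _) this
    have hNames : ∀ v : Int, pvNames v (p :: t)
        = (if p.2 = v then [p.1] else []) ++ pvNames v t := by
      intro v
      by_cases hv : p.2 = v <;> simp [pvNames, hv]
    by_cases h1 : p.2 > b
    · have hmax : max b p.2 = p.2 := by omega
      have hleM := hle p.2 t
      rw [List.foldl_cons]
      simp only [altStep, if_neg hp, if_pos h1]
      rw [ih p.2 [p.1] hq', hM, hmax, hNames]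
      have hne : ¬ pvMaxFrom p.2 t = b := by omega
      rw [if_neg hne]
      by_cases h2 : pvMaxFrom p.2 t = p.2
      · rw [if_pos h2, if_pos h2.symm]
        simp
      · rw [if_neg h2, if_neg (fun h => h2 h.symm)]
        simp
    · rw [List.foldl_cons]
      by_cases h2 : p.2 = b
      · have hmax : max b p.2 = b := by omega
        simp only [altStep, if_neg hp, if_neg h1, if_pos h2]
        rw [ih b (acc ++ [p.1]) hq', hM, hmax, hNames]
        have hleM := hle b t
        by_cases h3 : pvMaxFrom b t = b
        · rw [if_pos h3, if_pos h3, if_pos (by omega : p.2 = pvMaxFrom b t)]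
          simp
        · rw [if_neg h3, if_neg h3, if_neg (by omega : ¬ p.2 = pvMaxFrom b t)]
          simp
      · have hlt2 : p.2 < b := by omega
        have hmax : max b p.2 = b := by omega
        simp only [altStep, if_neg hp, if_neg h1, if_neg h2]
        rw [ih b acc hq', hM, hmax, hNames]
        have hleM := hle b t
        rw [if_neg (by omega : ¬ p.2 = pvMaxFrom b t)]
        simp

lemma pvQual_qual (m : Int) (scores : List (String × Int)) :
    ∀ p ∈ pvQual m scores, m ≤ p.2 := by
  intro p hp
  simp [pvQual, List.mem_filter] at hp
  exact_mod_cast hp.2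

-- ===== VERDICT (by name: the statement is the Claim_ definition above) =====
theorem find_top_students_spec : Claim_equal_find_top_students := by
  intro scores min_score _ hpre
  unfold Spec_find_top_students find_top_students find_top_students_alt
  have hitems := pvA_dict_items min_score scores PySem.Dict.empty (by simpa using hpre)
  have hempty : (PySem.Dict.empty : PySem.Dict String Int).items = [] := rfl
  rw [hempty, List.nil_append] at hitems
  have hvals : (scores.foldl (fun d p => if p.2 ≥ min_score then d.insert p.1 p.2 else d)
      (PySem.Dict.empty : PySem.Dict String Int)).values
      = (pvQual min_score scores).map Prod.snd := by
    show (scores.foldl (fun d p => if p.2 ≥ min_score then d.insert p.1 p.2 else d)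
      (PySem.Dict.empty : PySem.Dict String Int)).items.map Prod.snd = _
    rw [hitems]
  rw [pvB_fold_filter]
  simp only [hitems, hvals]
  cases hfl : pvQual min_score scores with
  | nil => simp
  | cons x t =>
    have hq := pvQual_qual min_score scores
    rw [hfl] at hq
    have hqx : ¬ (x.2 < min_score) := by have := hq x (by simp); omega
    have hmax : PySem.List.max? ((x :: t).map Prod.snd) (fun v => v)
        = some ((t.map Prod.snd).foldl max x.2) := by
      simp only [List.map_cons]
      exact PySem.List.max?_id_cons (x := x.2) (t := t.map Prod.snd)
    have hMeq : (t.map Prod.snd).foldl max x.2 = pvMaxFrom x.2 t := by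
      simp [pvMaxFrom, List.foldl_map]
    have hB := pvB_loop min_score t x.2 [x.1] (fun p hp => hq p (by simp [hp]))
    rw [hmax, hMeq, List.foldl_cons]
    simp only [altStep, if_neg hqx]
    rw [hB]
    simp only [List.isEmpty_cons]
    by_cases h : pvMaxFrom x.2 t = x.2
    · simp [pvNames, h]
    · have hne : x.2 ≠ pvMaxFrom x.2 t := fun hh => h hh.symm
      simp [pvNames, hne, h]
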